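-- pv_equiv track=rewrite | github.com/rohan8594/DS-Algos | misc challenges/Clutter.py | generate_phases
-- ===== SOURCE A (Python) =====
-- import collections
--
-- def generate_phases(phrases):
--     phraseMap = collections.defaultdict(list)
--     res = []
--
--     for phrase in phrases:
--         phraseMap[phrase.split()[0]].append(phrase)
--
--     for phrase in phrases:
--         phrase = phrase.split()
--
--         if phrase[-1] in phraseMap:
--             for cur in phraseMap[phrase[-1]]:
--                 res.append(' '.join(phrase[:-1]) + " " + cur)
--     return res
-- ===== SOURCE B (Python) =====
-- def generate_phases(phrases):
--     res = []
--     for phrase in phrases: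
--         words = phrase.split()
--         prefix = ' '.join(words[:-1])
--         last = words[-1]
--         for cur in phrases:
--             if cur.split()[0] == last:
--                 res.append(prefix + " " + cur)
--     return res
-- ===== Notes on version B (the rewrite author's own statement) =====
-- stated objective: simpler
-- what changed: Drops the precomputed defaultdict first-word index and membership test; B just does a flat nested double scan over phrases, appending whenever cur's first word equals the outer phrase's last word, which preserves the exact emit order.
import Mathlib
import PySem

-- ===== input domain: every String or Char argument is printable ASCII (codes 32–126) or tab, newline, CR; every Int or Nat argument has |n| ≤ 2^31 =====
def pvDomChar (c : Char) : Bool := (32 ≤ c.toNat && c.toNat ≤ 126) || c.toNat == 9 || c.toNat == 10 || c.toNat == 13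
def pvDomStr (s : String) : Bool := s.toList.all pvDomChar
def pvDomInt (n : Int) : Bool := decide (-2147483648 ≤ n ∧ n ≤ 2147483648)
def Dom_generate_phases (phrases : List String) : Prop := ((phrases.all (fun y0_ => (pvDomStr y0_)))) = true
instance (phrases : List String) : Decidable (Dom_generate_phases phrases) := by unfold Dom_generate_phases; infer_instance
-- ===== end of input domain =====

-- B removes A's precomputed first-word index and uses a plain nested scan over phrases (simpler, same output order).


-- ===== PORT A =====
-- phrase.split()[0] / phrase[-1]: Python raises IndexError on an empty split; Pre_ excludes that,
-- so .headD "" / .getLastD "" are exact on the admitted inputs.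
def generate_phases (phrases : List String) : List String :=
  let phraseMap : PySem.Dict String (List String) :=
    phrases.foldl (fun d p => d.modify ((PySem.Str.split₀ p).headD "") [] (· ++ [p])) PySem.Dict.empty
  phrases.foldl (fun res p =>
    let ws := PySem.Str.split₀ p
    if phraseMap.contains (ws.getLastD "") then
      (phraseMap.getD (ws.getLastD "") []).foldl
        (fun r cur => r ++ [PySem.Str.join " " ws.dropLast ++ " " ++ cur]) res
    else res) []

-- ===== PORT B =====
def generate_phases_alt (phrases : List String) : List String :=
  phrases.foldl (fun res p =>
    let words := PySem.Str.split₀ p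
    let pre := PySem.Str.join " " words.dropLast
    let last := words.getLastD ""
    phrases.foldl (fun r cur =>
      if (PySem.Str.split₀ cur).headD "" == last then r ++ [pre ++ " " ++ cur] else r) res) []

-- ===== PRECONDITION & SPEC =====
-- Python A raises IndexError on any phrase whose split() is empty (whitespace-only phrase); B raises there too.
def Pre_generate_phases (phrases : List String) : Prop :=
  (phrases.all (fun s => !(PySem.Str.split₀ s).isEmpty)) = true
instance (phrases : List String) : Decidable (Pre_generate_phases phrases) := by
  unfold Pre_generate_phases; infer_instance
def pvWitness_generate_phases : List String := ["the cat", "cat runs fast", "runs home"]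
def Spec_generate_phases (phrases : List String) (out : List String) : Prop := out = generate_phases_alt phrases
instance (phrases : List String) (out : List String) : Decidable (Spec_generate_phases phrases out) := by unfold Spec_generate_phases; infer_instance

-- ===== CLAIM (what is proved, stated in full; the proofs are below) =====
def Claim_equal_generate_phases : Prop := ∀ (phrases : List String), Dom_generate_phases phrases → Pre_generate_phases phrases → Spec_generate_phases phrases (generate_phases phrases)

-- ===== LEMMAS AND PROOFS =====

-- A's index, folded out of the port for the lemmas below
def pvKey (p : String) : String := (PySem.Str.split₀ p).headD ""

theorem pvBuild_eq_pairs (phrases : List String) :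
    phrases.foldl (fun d p => d.modify ((PySem.Str.split₀ p).headD "") [] (· ++ [p])) PySem.Dict.empty
      = (phrases.map (fun p => (pvKey p, p))).foldl
          (fun d q => d.modify q.1 [] (· ++ [q.2])) PySem.Dict.empty := by
  rw [List.foldl_map]; rfl

theorem pvBuild_getD (phrases : List String) (c : String) :
    (phrases.foldl (fun d p => d.modify ((PySem.Str.split₀ p).headD "") [] (· ++ [p]))
        PySem.Dict.empty).getD c []
      = phrases.filter (fun q => (PySem.Str.split₀ q).headD "" == c) := by
  rw [pvBuild_eq_pairs, PySem.Dict.getD_foldl_modify_append]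
  simp [List.filter_map, List.map_map, Function.comp_def, pvKey]

theorem pvBuild_not_contains (phrases : List String) (c : String)
    (h : (phrases.foldl (fun d p => d.modify ((PySem.Str.split₀ p).headD "") [] (· ++ [p]))
        PySem.Dict.empty).contains c = false) :
    phrases.filter (fun q => (PySem.Str.split₀ q).headD "" == c) = [] := by
  rw [← pvBuild_getD phrases c]
  exact PySem.Dict.getD_of_not_contains _ _ h

theorem generate_phases_agree (phrases : List String) :
    generate_phases phrases = generate_phases_alt phrases := by
  unfold generate_phases generate_phases_alt
  refine PySem.List.foldl_congr_mem _ _ _ _ (fun res p _ => ?_)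
  simp only
  rw [PySem.List.foldl_append_if
      (fun cur => (PySem.Str.split₀ cur).headD "" == (PySem.Str.split₀ p).getLastD "")
      (fun cur => PySem.Str.join " " (PySem.Str.split₀ p).dropLast ++ " " ++ cur)]
  by_cases h : (phrases.foldl (fun d p => d.modify ((PySem.Str.split₀ p).headD "") [] (· ++ [p]))
      PySem.Dict.empty).contains ((PySem.Str.split₀ p).getLastD "") = true
  · rw [if_pos h, pvBuild_getD, PySem.List.foldl_append_singleton_eq_map]
  · rw [if_neg h, pvBuild_not_contains phrases _ (by simpa using h)]
    simp

-- ===== VERDICT (by name: the statement is the Claim_ definition above) =====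
theorem generate_phases_spec : Claim_equal_generate_phases := by
  intro phrases _ _
  unfold Spec_generate_phases
  exact generate_phases_agree phrases
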